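-- pv_equiv track=rewrite | github.com/atrepalin/Types-and-data-structures-RSREU | containers/I.py | destroy_balls
-- ===== SOURCE A (Python) =====
-- def groupby(iterable):
--     if not iterable:
--         return
--
--     stack = []
--     current_key = iterable[0]
--
--     for item in iterable:
--         if item == current_key:
--             stack.append(item)
--         else:
--             yield (current_key, stack)
--             current_key = item
--             stack = [item]
--
--     yield (current_key, stack)
--
-- def destroy_balls(balls, res=0):
--     c = 0
--     for _, group in groupby(balls):
--         lg = len(list(group))
--         c += lg
--         if lg >= 3:
--             return destroy_balls(balls[:c-lg] + balls[c:], res + lg)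
--     return res
-- ===== SOURCE B (Python) =====
-- def destroy_balls(balls, res=0):
--     # Single left-to-right pass with a stack of (color, count) runs;
--     # a run is destroyed lazily when a different color arrives (or at the end).
--     stack = []
--     destroyed = 0
--     for x in balls:
--         if stack and stack[-1][0] == x:
--             c, k = stack[-1]
--             stack[-1] = (c, k + 1)
--         elif stack and stack[-1][1] >= 3:
--             destroyed += stack.pop()[1]
--             if stack and stack[-1][0] == x:
--                 c, k = stack[-1]
--                 stack[-1] = (c, k + 1)
--             else:
--                 stack.append((x, 1))
--         else:
--             stack.append((x, 1))
--     if stack and stack[-1][1] >= 3: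
--         destroyed += stack[-1][1]
--     return res + destroyed
-- ===== Notes on version B (the rewrite author's own statement) =====
-- stated objective: faster
-- what changed: A repeatedly regroups the whole list and recurses after removing the first run of length >=3 (quadratic restarts); B makes one left-to-right pass with a stack of (color,count) runs, lazily destroying a completed run when a different color arrives or at the end.
import Mathlib
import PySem

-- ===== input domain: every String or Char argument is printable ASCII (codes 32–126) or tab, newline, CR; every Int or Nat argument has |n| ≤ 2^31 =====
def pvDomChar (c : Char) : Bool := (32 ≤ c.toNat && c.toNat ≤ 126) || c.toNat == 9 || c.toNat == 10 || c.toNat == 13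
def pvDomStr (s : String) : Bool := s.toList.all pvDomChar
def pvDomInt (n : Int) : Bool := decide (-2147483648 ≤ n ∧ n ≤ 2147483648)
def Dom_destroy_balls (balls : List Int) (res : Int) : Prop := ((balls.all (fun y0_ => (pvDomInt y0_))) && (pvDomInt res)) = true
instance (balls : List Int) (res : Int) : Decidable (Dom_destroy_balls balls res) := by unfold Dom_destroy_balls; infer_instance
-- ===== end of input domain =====

-- B replaces A's restart-from-scratch quadratic recursion (regroup, remove first run ≥3, recurse)
-- by a single left-to-right pass over a stack of (color, count) runs: objective = faster (asymptotic).

-- ===== PORT A =====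

-- A's generator `groupby`: loop body, carrying current_key and the accumulated stack.
def pyGroupbyLoop : List Int → Int → List Int → List (Int × List Int)
  | [], ck, stack => [(ck, stack)]
  | x :: rest, ck, stack =>
    if x = ck then pyGroupbyLoop rest ck (stack ++ [x])
    else (ck, stack) :: pyGroupbyLoop rest x [x]

def pyGroupby : List Int → List (Int × List Int)
  | [] => []
  | h :: t => pyGroupbyLoop (h :: t) h []

-- A's recursion, made total with fuel (each recursive call removes ≥3 balls, so
-- fuel = balls.length + 1 always suffices; the fuel guard is never reached).
mutual
def destroyA : Nat → List Int → Int → Int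
  | 0, _, res => res
  | f + 1, balls, res => destroyALoop f balls res (pyGroupby balls) 0

-- A's `for _, group in groupby(balls)` loop, carrying c.
def destroyALoop : Nat → List Int → Int → List (Int × List Int) → Int → Int
  | _, _, res, [], _ => res
  | f, balls, res, (_, g) :: rest, c =>
    let lg : Int := g.length
    let c' := c + lg
    if 3 ≤ lg then
      destroyA f (PySem.List.slice balls none (some (c' - lg)) ++ PySem.List.slice balls (some c') none) (res + lg)
    else destroyALoop f balls res rest c'
end

def destroy_balls (balls : List Int) (res : Int) : Int := destroyA (balls.length + 1) balls res

-- ===== PORT B =====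

-- One ball against the run stack (head = top): merge with the top run; otherwise,
-- if the top run is complete (≥3), destroy it and merge/push onto what is below.
def stepB (st : List (Int × Int)) (d : Int) (x : Int) : List (Int × Int) × Int :=
  match st with
  | (c, k) :: rest =>
    if c = x then ((c, k + 1) :: rest, d)
    else if 3 ≤ k then
      match rest with
      | (c2, k2) :: rest2 =>
        if c2 = x then ((c2, k2 + 1) :: rest2, d + k) else ((x, 1) :: rest, d + k)
      | [] => ([(x, 1)], d + k)
    else ((x, 1) :: st, d)
  | [] => ([(x, 1)], d)

-- B's `for x in balls` loop.
def runB : List Int → List (Int × Int) → Int → List (Int × Int) × Int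
  | [], st, d => (st, d)
  | x :: t, st, d => runB t (stepB st d x).1 (stepB st d x).2

-- B's final check of the remaining top run.
def finB : List (Int × Int) × Int → Int
  | ((_, k) :: _, d) => if 3 ≤ k then d + k else d
  | ([], d) => d

def destroy_balls_alt (balls : List Int) (res : Int) : Int :=
  res + finB (runB balls [] 0)

-- ===== PRECONDITION & SPEC =====
def Spec_destroy_balls (balls : List Int) (res : Int) (out : Int) : Prop := out = destroy_balls_alt balls res
instance (balls : List Int) (res : Int) (out : Int) : Decidable (Spec_destroy_balls balls res out) := by unfold Spec_destroy_balls; infer_instance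

-- ===== CLAIM (what is proved, stated in full; the proofs are below) =====
def Claim_equal_destroy_balls : Prop := ∀ (balls : List Int) (res : Int), Dom_destroy_balls balls res → Spec_destroy_balls balls res (destroy_balls balls res)

-- ===== LEMMAS AND PROOFS =====

-- total destroyed count computed by B's pass
def stackD (balls : List Int) : Int := finB (runB balls [] 0)

def topSmall : List (Int × Int) → Prop
  | [] => True
  | (_, k) :: _ => k < 3

def topNe (x : Int) : List (Int × Int) → Prop
  | [] => True
  | (c, _) :: _ => c ≠ x

def headNe (x : Int) : List Int → Prop
  | [] => True
  | y :: _ => y ≠ x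

def flatG (gs : List (Int × List Int)) : List Int := (gs.map Prod.snd).flatten

def keyNe (x : Int) : List (Int × List Int) → Prop
  | [] => True
  | (k, _) :: _ => k ≠ x

def wfG : List (Int × List Int) → Prop
  | [] => True
  | (k, g) :: rest => g = List.replicate g.length k ∧ 0 < g.length ∧ keyNe k rest ∧ wfG rest

-- the d component only accumulates: stepB's stack is independent of d
theorem stepB_shift (st : List (Int × Int)) (d x : Int) :
    stepB st d x = ((stepB st 0 x).1, d + (stepB st 0 x).2) := by
  rcases st with _ | ⟨⟨c, k⟩, rest⟩
  · simp [stepB]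
  · rcases rest with _ | ⟨⟨c2, k2⟩, rest2⟩ <;>
      · simp only [stepB]
        split_ifs <;> simp

theorem runB_shift (S : List Int) (st : List (Int × Int)) (d : Int) :
    runB S st d = ((runB S st 0).1, d + (runB S st 0).2) := by
  induction S generalizing st d with
  | nil => simp [runB]
  | cons x t ih =>
    simp only [runB]
    rw [stepB_shift st d x]
    rw [ih (stepB st 0 x).1 (d + (stepB st 0 x).2), ih (stepB st 0 x).1 (stepB st 0 x).2]
    simp; ring

theorem finB_shift (st : List (Int × Int)) (a b : Int) :
    finB (st, a + b) = a + finB (st, b) := by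
  rcases st with _ | ⟨⟨c, k⟩, rest⟩ <;> simp [finB] <;> split_ifs <;> ring

theorem finB_runB_shift (S : List Int) (st : List (Int × Int)) (d : Int) :
    finB (runB S st d) = d + finB (runB S st 0) := by
  rw [runB_shift]
  have : runB S st 0 = ((runB S st 0).1, (runB S st 0).2) := rfl
  rw [this, finB_shift]

theorem runB_append (a b : List Int) (st : List (Int × Int)) (d : Int) :
    runB (a ++ b) st d = runB b (runB a st d).1 (runB a st d).2 := by
  induction a generalizing st d with
  | nil => simp [runB]
  | cons x t ih => simp only [List.cons_append, runB]; rw [ih]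

-- feeding j + m copies of k onto a top run (k, j)
theorem runB_replicate_merge (m : Nat) (st : List (Int × Int)) (d k j : Int) :
    runB (List.replicate m k) ((k, j) :: st) d = ((k, j + m) :: st, d) := by
  induction m generalizing j with
  | zero => simp [runB]
  | succ n ih =>
    rw [List.replicate_succ]
    simp only [runB, stepB, eq_self_iff_true, if_true]
    rw [ih (j + 1)]
    congr 2
    push_cast; ring

-- a fresh run of m ≥ 1 copies of k lands on the stack as (k, m), destroying nothing
theorem runB_replicate (m : Nat) (st : List (Int × Int)) (d k : Int)
    (hm : 1 ≤ m) (hs : topSmall st) (hn : topNe k st) :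
    runB (List.replicate m k) st d = ((k, (m : Int)) :: st, d) := by
  obtain ⟨j, rfl⟩ : ∃ j, m = j + 1 := ⟨m - 1, by omega⟩
  rw [List.replicate_succ]
  have hstep : stepB st d k = ((k, 1) :: st, d) := by
    rcases st with _ | ⟨⟨c, kk⟩, rest⟩
    · simp [stepB]
    · simp only [topSmall] at hs
      simp only [topNe] at hn
      simp only [stepB]
      rw [if_neg hn, if_neg (by omega)]
  simp only [runB, hstep]
  rw [runB_replicate_merge]
  congr 2
  push_cast; ring

-- destroying a complete top run now or counting it later is the same
theorem stepB_pop (st : List (Int × Int)) (d k lg y : Int)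
    (hlg : 3 ≤ lg) (hs : topSmall st) (hy : y ≠ k) :
    stepB ((k, lg) :: st) d y = stepB st (d + lg) y := by
  rcases st with _ | ⟨⟨c2, k2⟩, rest⟩
  · simp only [stepB]
    rw [if_neg (fun h => hy h.symm), if_pos hlg]
  · simp only [topSmall] at hs
    simp only [stepB]
    rw [if_neg (fun h => hy h.symm), if_pos hlg]
    split_ifs with h1 h2 <;> first | rfl | omega

theorem finB_runB_pop (S : List Int) (st : List (Int × Int)) (d k lg : Int)
    (hlg : 3 ≤ lg) (hs : topSmall st) (hS : headNe k S) :
    finB (runB S ((k, lg) :: st) d) = finB (runB S st (d + lg)) := by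
  rcases S with _ | ⟨y, t⟩
  · simp only [runB, finB]
    rw [if_pos hlg]
    rcases st with _ | ⟨⟨c2, k2⟩, rest⟩
    · simp [finB]
    · simp only [topSmall] at hs
      simp only [finB]
      rw [if_neg (by omega)]
  · simp only [headNe] at hS
    simp only [runB]
    rw [stepB_pop st d k lg y hlg hs hS]

theorem finB_topSmall (st : List (Int × Int)) (d : Int) (hs : topSmall st) :
    finB (st, d) = d := by
  rcases st with _ | ⟨⟨c, k⟩, rest⟩
  · simp [finB]
  · simp only [topSmall] at hs
    simp only [finB]
    rw [if_neg (by omega)]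

theorem headNe_flatG (x : Int) (gs : List (Int × List Int)) (hw : wfG gs) (hk : keyNe x gs) :
    headNe x (flatG gs) := by
  rcases gs with _ | ⟨⟨k, g⟩, rest⟩
  · simp [flatG, headNe]
  · obtain ⟨hg, hlen, _, _⟩ := hw
    simp only [keyNe] at hk
    obtain ⟨n, hn⟩ : ∃ n, g.length = n + 1 := ⟨g.length - 1, by omega⟩
    simp only [flatG, List.map_cons, List.flatten_cons]
    rw [hg, hn, List.replicate_succ]
    simpa [headNe] using hk

-- the groupby generator: correctness of the accumulated run
theorem pyGroupbyLoop_spec (t : List Int) : ∀ (ck : Int) (m : Nat), 0 < m →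
    flatG (pyGroupbyLoop t ck (List.replicate m ck)) = List.replicate m ck ++ t ∧
    wfG (pyGroupbyLoop t ck (List.replicate m ck)) ∧
    ∃ g rest, pyGroupbyLoop t ck (List.replicate m ck) = (ck, g) :: rest := by
  induction t with
  | nil =>
    intro ck m hm
    refine ⟨by simp [pyGroupbyLoop, flatG], ?_, _, _, rfl⟩
    simp only [pyGroupbyLoop, wfG]
    exact ⟨by simp, by simpa using hm, trivial, trivial⟩
  | cons x t' ih =>
    intro ck m hm
    by_cases hx : x = ck
    · subst hx
      simp only [pyGroupbyLoop, eq_self_iff_true, if_true]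
      rw [← List.replicate_succ']
      obtain ⟨h1, h2, h3⟩ := ih x (m + 1) (by omega)
      refine ⟨?_, h2, h3⟩
      rw [h1, List.replicate_succ', List.append_assoc]
      simp
    · simp only [pyGroupbyLoop, if_neg hx]
      obtain ⟨h1, h2, g, rest, h3⟩ := ih x 1 (by omega)
      rw [show [x] = List.replicate 1 x by simp]
      refine ⟨?_, ?_, _, _, rfl⟩
      · have hsplit : flatG ((ck, List.replicate m ck) :: pyGroupbyLoop t' x (List.replicate 1 x))
            = List.replicate m ck ++ flatG (pyGroupbyLoop t' x (List.replicate 1 x)) := by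
          simp [flatG]
        rw [hsplit, h1]
        simp
      · simp only [wfG]
        refine ⟨by simp, by simpa using hm, ?_, h2⟩
        rw [h3]
        simp only [keyNe]
        exact hx

-- main loop invariant: A's loop over the remaining groups returns res + (B's total count)
theorem destroyALoop_spec (f : Nat)
    (ihf : ∀ (b' : List Int) (r' : Int), b'.length < f → destroyA f b' r' = r' + stackD b') :
    ∀ (gs : List (Int × List Int)) (pre : List Int) (st : List (Int × Int))
      (balls : List Int) (res c : Int),
      balls = pre ++ flatG gs → c = (pre.length : Int) → balls.length < f + 1 →
      runB pre [] 0 = (st, 0) → topSmall st →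
      (match gs with | [] => True | (k, _) :: _ => topNe k st) →
      wfG gs →
      destroyALoop f balls res gs c = res + stackD balls := by
  intro gs
  induction gs with
  | nil =>
    intro pre st balls res c hb hc hf hr hs _ _
    simp only [flatG, List.map_nil, List.flatten_nil, List.append_nil] at hb
    subst hb
    simp only [destroyALoop, stackD, hr]
    rw [finB_topSmall st 0 hs]
    ring
  | cons hd rest ih =>
    rcases hd with ⟨k, g⟩
    intro pre st balls res c hb hc hf hr hs hn hw
    obtain ⟨hg, hlen, hkne, hwr⟩ := hw
    simp only [topNe] at hn
    have hflat : flatG ((k, g) :: rest) = g ++ flatG rest := by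
      simp [flatG]
    rw [hflat] at hb
    simp only [destroyALoop]
    split_ifs with h3
    · -- first complete run found: A removes it and recurses
      have h3' : 3 ≤ g.length := by exact_mod_cast h3
      have hto : c + (g.length : Int) - (g.length : Int) = ((pre.length : Nat) : Int) := by
        rw [hc]; ring
      have hfrom : c + (g.length : Int) = (((pre ++ g).length : Nat) : Int) := by
        rw [hc]; push_cast [List.length_append]; ring
      rw [hto, PySem.List.slice_to_natCast, hfrom, PySem.List.slice_from_natCast]
      have htake : balls.take pre.length = pre := by
        rw [hb, ← List.append_assoc]
        have : pre.length ≤ (pre ++ g).length := by simp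
        rw [List.take_append_of_le_length (by simp), List.take_left]
      have hdrop : balls.drop (pre ++ g).length = flatG rest := by
        rw [hb, ← List.append_assoc, List.drop_left]
      rw [htake, hdrop]
      have hlt : (pre ++ flatG rest).length < f := by
        have h1 : balls.length = pre.length + g.length + (flatG rest).length := by
          rw [hb]; simp [List.length_append]; ring
        have h2 : (pre ++ flatG rest).length = pre.length + (flatG rest).length := by
          simp
        omega
      rw [ihf _ _ hlt]
      -- relate stackD balls to stackD (pre ++ flatG rest)
      have hrun1 : stackD balls = finB (runB (flatG rest) ((k, (g.length : Int)) :: st) 0) := by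
        simp only [stackD]
        rw [hb, runB_append, runB_append, hr]
        simp only []
        rw [hg, runB_replicate g.length st 0 k (by omega) hs hn]
        rw [← hg]
      have hrun2 : stackD (pre ++ flatG rest) = finB (runB (flatG rest) st 0) := by
        simp only [stackD]
        rw [runB_append, hr]
      rw [hrun1, hrun2]
      rw [finB_runB_pop (flatG rest) st 0 k (g.length : Int) h3 hs
        (headNe_flatG k rest hwr hkne)]
      rw [zero_add, finB_runB_shift (flatG rest) st (g.length : Int)]
      ring
    · -- small run: push it and continue
      have h3' : g.length < 3 := by
        by_contra hcon
        exact h3 (by exact_mod_cast Nat.le_of_not_lt hcon)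
      have hr' : runB (pre ++ g) [] 0 = ((k, (g.length : Int)) :: st, 0) := by
        rw [runB_append, hr]
        simp only []
        rw [hg, runB_replicate g.length st 0 k (by omega) hs hn, ← hg]
      refine ih (pre ++ g) ((k, (g.length : Int)) :: st) balls res (c + (g.length : Int))
        (by rw [hb, List.append_assoc]) ?_ hf hr' (by simp only [topSmall]; exact_mod_cast h3') ?_ hwr
      · rw [hc]; push_cast [List.length_append]; ring
      · rcases rest with _ | ⟨⟨k2, g2⟩, r2⟩
        · trivial
        · simp only [keyNe] at hkne
          simp only [topNe]
          exact hkne.symm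

theorem destroyA_spec (f : Nat) : ∀ (balls : List Int) (res : Int),
    balls.length < f → destroyA f balls res = res + stackD balls := by
  induction f with
  | zero => intro balls res h; omega
  | succ f ihf =>
    intro balls res h
    simp only [destroyA]
    rcases balls with _ | ⟨x, t⟩
    · simp [pyGroupby, destroyALoop, stackD, runB, finB]
    · have hgb : pyGroupby (x :: t) = pyGroupbyLoop t x (List.replicate 1 x) := by
        simp [pyGroupby, pyGroupbyLoop]
      obtain ⟨h1, h2, g, rest, h3⟩ := pyGroupbyLoop_spec t x 1 (by omega)
      refine destroyALoop_spec f ihf (pyGroupby (x :: t)) [] [] (x :: t) res 0 ?_ (by simp) h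
        (by simp [runB]) trivial ?_ ?_
      · rw [hgb, h1]; simp
      · rw [hgb, h3]; trivial
      · rw [hgb]; exact h2

-- ===== VERDICT (by name: the statement is the Claim_ definition above) =====
theorem destroy_balls_spec : Claim_equal_destroy_balls := by
  intro balls res _
  unfold Spec_destroy_balls destroy_balls destroy_balls_alt
  rw [destroyA_spec (balls.length + 1) balls res (by omega)]
  rfl
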